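-- pv_equiv track=rewrite | github.com/danieluxury88/DrupalAnalyzerBot | drupal/config_files_reader/config_files_reader.py | sort_and_group_by_depth
-- ===== SOURCE A (Python) =====
-- from collections import defaultdict
--
-- def sort_and_group_by_depth(file_list, group_depth):
--     """
--     Sorts the file names based on their depth, groups them by a specified depth level, and ensures no duplicates.
--     Groups are sorted so that those with fewer segments appear first.
--
--     Args:
--         file_list (list of str): The list of filenames.
--         group_depth (int): The depth level at which to group the filenames.
--
--     Returns:
--         dict: A dictionary where keys are the group names and values are lists of filenames, with no duplicates.
--     """
--
--     # Remove duplicates in the input list to ensure they don't affect grouping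
--     unique_files = list(set(file_list))
--
--     # Parsing each filename and storing in a dictionary based on their depth
--     depth_dict = defaultdict(list)
--     for filename in unique_files:
--         depth = filename.count('.')  # depth based on the number of dots
--         depth_dict[depth].append(filename)
--
--     # Sorting files within each depth
--     for depth in depth_dict:
--         depth_dict[depth].sort(key=lambda x: x.split('.'))
--
--     # Grouping by specified depth level
--     grouped_files = defaultdict(list)
--     for files in depth_dict.values():
--         for file in files:
--             # Split the filename and create a group key based on the specified depth level
--             parts = file.split('.')
--             group_key = '.'.join(parts[:group_depth]) if len(parts) > group_depth else '.'.join(parts)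
--             if file not in grouped_files[group_key]:  # Check to avoid duplicates in the same group
--                 grouped_files[group_key].append(file)
--
--     # Sorting groups by number of segments (fewer segments come first)
--     sorted_grouped_files = {k: sorted(v) for k, v in sorted(grouped_files.items(), key=lambda x: (x[0].count('.'), x))}
--     return sorted_grouped_files
-- ===== SOURCE B (Python) =====
-- from collections import defaultdict
--
-- def sort_and_group_by_depth(file_list, group_depth):
--     # One global sort of the deduplicated names replaces A's per-depth and
--     # per-group sorts: each group's list is a subsequence of the sorted whole,
--     # hence already in order.
--     grouped = defaultdict(list)
--     for name in sorted(set(file_list)):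
--         parts = name.split('.')
--         key = '.'.join(parts[:group_depth]) if len(parts) > group_depth else '.'.join(parts)
--         grouped[key].append(name)
--     return {k: grouped[k] for k in sorted(grouped, key=lambda k: (k.count('.'), k))}
-- ===== Notes on version B (the rewrite author's own statement) =====
-- stated objective: simpler
-- what changed: A buckets the deduplicated names by dot-count, sorts each bucket, regroups bucket by bucket with a per-group membership test and finally re-sorts every group value; B sorts the deduplicated names once globally and does a single grouping pass, so each group is already in its final order and the per-depth index, the membership test and the per-group sorts all disappear.
import Mathlib
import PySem

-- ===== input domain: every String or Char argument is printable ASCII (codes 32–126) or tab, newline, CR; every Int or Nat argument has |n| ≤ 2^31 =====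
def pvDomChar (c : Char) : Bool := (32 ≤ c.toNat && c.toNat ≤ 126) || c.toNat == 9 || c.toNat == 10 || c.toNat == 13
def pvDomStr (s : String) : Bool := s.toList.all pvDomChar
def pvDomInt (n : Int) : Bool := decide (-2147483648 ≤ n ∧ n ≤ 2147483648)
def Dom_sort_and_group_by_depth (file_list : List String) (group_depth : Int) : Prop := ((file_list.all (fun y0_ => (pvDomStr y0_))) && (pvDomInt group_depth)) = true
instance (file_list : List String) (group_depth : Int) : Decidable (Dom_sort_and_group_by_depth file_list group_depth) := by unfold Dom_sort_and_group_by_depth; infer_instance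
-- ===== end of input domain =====

-- B replaces A's per-depth bucketing, per-depth sorts and per-group value sorts by ONE
-- global sort of the deduplicated names followed by a single grouping pass (simpler).

-- ===== PORT A =====
-- x.split('.') : the separator "." is a nonempty literal, so PySem.Str.split? is always `some` (exact)
def pvSplitDots (s : String) : List String := (PySem.Str.split? s ".").getD []

-- group_key = '.'.join(parts[:group_depth]) if len(parts) > group_depth else '.'.join(parts)
def pvGroupKeyA (group_depth : Int) (file : String) : String :=
  let parts := pvSplitDots file
  if (parts.length : Int) > group_depth then
    PySem.Str.join "." (PySem.List.slice parts none (some group_depth))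
  else PySem.Str.join "." parts

-- the comparison sorted(…, key=lambda x: (x[0].count('.'), x)) sorts by:
-- Python's lexicographic tuple comparison written out step for step (exact)
def pvBeforeA (x y : String × List String) : Bool :=
  decide ((PySem.Str.count x.1 "." : Int) < (PySem.Str.count y.1 "." : Int)) ||
    ((PySem.Str.count x.1 "." : Int) == (PySem.Str.count y.1 "." : Int)) &&
      (decide (x.1 < y.1) || (x.1 == y.1) && decide (x.2 < y.2))

def sort_and_group_by_depth (file_list : List String) (group_depth : Int) : List (String × List String) :=
  -- unique_files = list(set(file_list))  (consumed only where the result cannot depend on its order)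
  let unique_files : List String := PySem.Set.ofList file_list
  -- depth_dict[depth].append(filename)  (defaultdict(list))
  let depth_dict : PySem.Dict Int (List String) :=
    unique_files.foldl
      (fun d filename => d.modify ((PySem.Str.count filename "." : Int)) [] (fun v => v ++ [filename]))
      PySem.Dict.empty
  -- for depth in depth_dict: depth_dict[depth].sort(key=lambda x: x.split('.')) — in-place sort of each value
  let depth_dict2 : PySem.Dict Int (List String) :=
    PySem.Dict.mk (depth_dict.items.map (fun p => (p.1, PySem.List.sorted p.2 pvSplitDots false)))
  -- for files in depth_dict.values(): for file in files: …
  let grouped_files : PySem.Dict String (List String) :=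
    depth_dict2.values.foldl
      (fun g files =>
        files.foldl
          (fun g file =>
            let group_key := pvGroupKeyA group_depth file
            -- 'if file not in grouped_files[group_key]': the defaultdict lookup itself creates the key
            if file ∈ g.getD group_key [] then g.setdefault group_key []
            else g.modify group_key [] (fun v => v ++ [file]))
          g)
      PySem.Dict.empty
  -- sorted(grouped_files.items(), key=…): the same stable insertion scheme as PySem.List.sorted,
  -- with the tuple key comparison pvBeforeA (ported by hand: '<' on pairs in Lean is not Python's; exact)
  let sorted_items := grouped_files.items.foldl (fun acc x => PySem.List.insertBy pvBeforeA x acc) []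
  -- {k: sorted(v) for k, v in …}: the keys are distinct dict keys, so the comprehension is a plain map (exact)
  sorted_items.map (fun p => (p.1, PySem.List.sorted p.2 (fun x => x) false))

-- ===== PORT B =====
-- same group-key expression as in Source B; separator "." nonempty, split? always `some` (exact)
def pvGroupKeyB (group_depth : Int) (name : String) : String :=
  let parts := (PySem.Str.split? name ".").getD []
  if (parts.length : Int) > group_depth then
    PySem.Str.join "." (PySem.List.slice parts none (some group_depth))
  else PySem.Str.join "." parts

def sort_and_group_by_depth_alt (file_list : List String) (group_depth : Int) : List (String × List String) :=
  -- for name in sorted(set(file_list)): grouped[name's key].append(name)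
  let grouped : PySem.Dict String (List String) :=
    (PySem.List.sorted (PySem.Set.ofList file_list) (fun x => x) false).foldl
      (fun g name => g.modify (pvGroupKeyB group_depth name) [] (fun v => v ++ [name]))
      PySem.Dict.empty
  -- {k: grouped[k] for k in sorted(grouped, key=lambda k: (k.count('.'), k))}
  (PySem.List.sorted2 grouped.keys (fun k => (PySem.Str.count k "." : Int)) (fun k => k) false).map
    (fun k => (k, grouped.getD k []))

-- ===== PRECONDITION & SPEC =====
def Spec_sort_and_group_by_depth (file_list : List String) (group_depth : Int) (out : List (String × List String)) : Prop := out = sort_and_group_by_depth_alt file_list group_depth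
instance (file_list : List String) (group_depth : Int) (out : List (String × List String)) : Decidable (Spec_sort_and_group_by_depth file_list group_depth out) := by unfold Spec_sort_and_group_by_depth; infer_instance

-- ===== CLAIM (what is proved, stated in full; the proofs are below) =====
def Claim_equal_sort_and_group_by_depth : Prop := ∀ (file_list : List String) (group_depth : Int), Dom_sort_and_group_by_depth file_list group_depth → Spec_sort_and_group_by_depth file_list group_depth (sort_and_group_by_depth file_list group_depth)

-- ===== LEMMAS AND PROOFS =====

set_option maxHeartbeats 2000000

-- the (count('.'), name) ordering as one genuinely linear key
def pvKeyLex (k : String) : Lex (Int × String) := toLex ((PySem.Str.count k "." : Int), k)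

lemma pvGroupKeyB_eq : pvGroupKeyB = pvGroupKeyA := rfl

lemma pvKeyLex_inj : Function.Injective pvKeyLex := by
  intro a b h
  have := congrArg (fun p => (ofLex p).2) h
  simpa [pvKeyLex] using this

-- ---- generic insertion-sort machinery ----

lemma pvInsertBy_perm {α : Type} (R : α → α → Bool) (x : α) (l : List α) :
    (PySem.List.insertBy R x l).Perm (x :: l) := by
  induction l with
  | nil => simp [PySem.List.insertBy]
  | cons y ys ih =>
      by_cases h : R x y = true
      · simp [PySem.List.insertBy, h]
      · simp only [PySem.List.insertBy, h]
        exact ((ih.cons y).trans (List.Perm.swap x y ys))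

lemma pvIsort_perm {α : Type} (R : α → α → Bool) (xs : List α) :
    ∀ acc, (xs.foldl (fun acc x => PySem.List.insertBy R x acc) acc).Perm (acc ++ xs) := by
  induction xs with
  | nil => intro acc; simp
  | cons x xs ih =>
      intro acc
      have h1 := ih (PySem.List.insertBy R x acc)
      have h2 : (PySem.List.insertBy R x acc ++ xs).Perm (acc ++ x :: xs) := by
        have := (pvInsertBy_perm R x acc).append_right xs
        exact this.trans (List.perm_middle.symm)
      simpa using h1.trans h2

lemma pvInsertBy_pairwise {α K : Type} [LinearOrder K] (κ : α → K) (R : α → α → Bool) (x : α) :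
    ∀ l : List α, l.Pairwise (fun a b => κ a < κ b) →
    (∀ z ∈ l, R x z = decide (κ x < κ z)) →
    (∀ z ∈ l, κ z ≠ κ x) →
    (PySem.List.insertBy R x l).Pairwise (fun a b => κ a < κ b) := by
  intro l
  induction l with
  | nil => intro _ _ _; simp [PySem.List.insertBy]
  | cons y ys ih =>
      intro hl hR hne
      rw [List.pairwise_cons] at hl
      by_cases h : R x y = true
      · simp only [PySem.List.insertBy, h, if_true]
        have hxy : κ x < κ y := by
          have := hR y (by simp)
          rw [this] at h; simpa using h
        refine List.Pairwise.cons ?_ (List.Pairwise.cons hl.1 hl.2)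
        intro z hz
        rcases List.mem_cons.mp hz with rfl | hz
        · exact hxy
        · exact lt_trans hxy (hl.1 z hz)
      · simp only [PySem.List.insertBy, h]
        have hyx : κ y < κ x := by
          have hxy := hR y (by simp)
          have : ¬ κ x < κ y := by
            intro hc; rw [hxy] at h; simp [hc] at h
          rcases lt_or_eq_of_le (le_of_not_gt this) with h' | h'
          · exact h'
          · exact absurd h' (hne y (by simp))
        refine List.Pairwise.cons ?_ ?_
        · intro z hz
          rw [PySem.List.mem_insertBy] at hz
          rcases hz with rfl | hz
          · exact hyx
          · exact hl.1 z hz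
        · exact ih hl.2 (fun z hz => hR z (by simp [hz])) (fun z hz => hne z (by simp [hz]))

lemma pvIsort_pairwise {α K : Type} [LinearOrder K] (κ : α → K) (R : α → α → Bool) (xs : List α) :
    ∀ acc, acc.Pairwise (fun a b => κ a < κ b) →
    (∀ a b, (a ∈ xs ∨ a ∈ acc) → (b ∈ xs ∨ b ∈ acc) → R a b = decide (κ a < κ b)) →
    (acc ++ xs).Pairwise (fun a b => κ a ≠ κ b) →
    (xs.foldl (fun acc x => PySem.List.insertBy R x acc) acc).Pairwise (fun a b => κ a < κ b) := by
  induction xs with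
  | nil => intro acc h _ _; simpa using h
  | cons x xs ih =>
      intro acc hacc hR hkey
      simp only [List.foldl_cons]
      have hmemins : ∀ z, z ∈ PySem.List.insertBy R x acc → z = x ∨ z ∈ acc := by
        intro z hz; exact (PySem.List.mem_insertBy R x z acc).mp hz
      have hkey' : (acc ++ x :: xs).Pairwise (fun a b => κ a ≠ κ b) := hkey
      have hxacc : ∀ z ∈ acc, κ z ≠ κ x := by
        intro z hz
        have := (List.pairwise_append.mp hkey').2.2 z hz x (by simp)
        exact this
      have hacc' : (PySem.List.insertBy R x acc).Pairwise (fun a b => κ a < κ b) := by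
        refine pvInsertBy_pairwise κ R x acc hacc ?_ hxacc
        intro z hz; exact hR x z (Or.inl (by simp)) (Or.inr hz)
      refine ih (PySem.List.insertBy R x acc) hacc' ?_ ?_
      · intro a b ha hb
        refine hR a b ?_ ?_
        · rcases ha with ha | ha
          · exact Or.inl (by simp [ha])
          · rcases hmemins a ha with rfl | ha
            · exact Or.inl (by simp)
            · exact Or.inr ha
        · rcases hb with hb | hb
          · exact Or.inl (by simp [hb])
          · rcases hmemins b hb with rfl | hb
            · exact Or.inl (by simp)
            · exact Or.inr hb
      · have hperm : (acc ++ x :: xs).Perm (PySem.List.insertBy R x acc ++ xs) := by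
          have h1 : (acc ++ x :: xs).Perm ((x :: acc) ++ xs) := List.perm_middle
          exact h1.trans (((pvInsertBy_perm R x acc).symm).append_right xs)
        exact (hperm.pairwise_iff (fun h e => h e.symm) |>.mp hkey')

lemma pvEq_of_perm_pairwise_lt {α K : Type} [LinearOrder K] (κ : α → K) :
    ∀ (l1 l2 : List α), l1.Perm l2 → l1.Pairwise (fun a b => κ a < κ b) →
      l2.Pairwise (fun a b => κ a < κ b) → l1 = l2 := by
  intro l1
  induction l1 with
  | nil => intro l2 hp _ _; simpa using hp.nil_eq.symm
  | cons a t1 ih =>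
      intro l2 hp h1 h2
      cases l2 with
      | nil => exact absurd hp.symm (by simp)
      | cons b t2 =>
          rw [List.pairwise_cons] at h1 h2
          have hab : a = b := by
            by_contra hne
            have ha : a ∈ b :: t2 := hp.mem_iff.mp (by simp)
            have hb : b ∈ a :: t1 := hp.mem_iff.mpr (by simp)
            have h1' : κ b < κ a := by
              rcases List.mem_cons.mp ha with h' | h'
              · exact absurd h' hne
              · exact h2.1 a h'
            have h2' : κ a < κ b := by
              rcases List.mem_cons.mp hb with h' | h'
              · exact absurd h'.symm hne
              · exact h1.1 b h'
            exact absurd h1' (not_lt_of_gt h2')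
          subst hab
          have := ih t2 hp.cons_inv h1.2 h2.2
          rw [this]

lemma pvIsort_eq {α K : Type} [LinearOrder K] (κ : α → K) (R : α → α → Bool)
    (xs ys : List α) (hperm : xs.Perm ys)
    (hR : ∀ a b, a ∈ ys → b ∈ ys → R a b = decide (κ a < κ b))
    (hsort : ys.Pairwise (fun a b => κ a < κ b)) :
    xs.foldl (fun acc x => PySem.List.insertBy R x acc) [] = ys := by
  have hout_perm : (xs.foldl (fun acc x => PySem.List.insertBy R x acc) []).Perm ys := by
    simpa using (pvIsort_perm R xs []).trans hperm
  have hxs_ne : ([] ++ xs : List α).Pairwise (fun a b => κ a ≠ κ b) := by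
    have hy : ys.Pairwise (fun a b => κ a ≠ κ b) := hsort.imp (fun h => ne_of_lt h)
    have := (hperm.pairwise_iff (R := fun a b => κ a ≠ κ b)
      (fun h e => h e.symm)).mpr hy
    simpa using this
  have hout_pw : (xs.foldl (fun acc x => PySem.List.insertBy R x acc) []).Pairwise
      (fun a b => κ a < κ b) := by
    refine pvIsort_pairwise κ R xs [] (by simp) ?_ hxs_ne
    intro a b ha hb
    simp only [List.not_mem_nil, or_false] at ha hb
    exact hR a b (hperm.mem_iff.mp ha) (hperm.mem_iff.mp hb)
  exact pvEq_of_perm_pairwise_lt κ _ _ hout_perm hout_pw hsort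

-- ---- comparison functions versus the Lex key ----

lemma pvBefore2_eq_lex {K1 K2 : Type} [LinearOrder K1] [LinearOrder K2] (c1 c2 : K1) (a b : K2) :
    (decide (c1 < c2) || !decide (c2 < c1) && decide (a < b))
      = decide (toLex (c1, a) < toLex (c2, b)) := by
  rcases lt_trichotomy c1 c2 with h | h | h
  · simp [h, Prod.Lex.lt_iff]
  · subst h; simp [Prod.Lex.lt_iff]
  · have h1 : ¬ c1 < c2 := not_lt_of_gt h
    have h2 : c1 ≠ c2 := ne_of_gt h
    simp [Prod.Lex.lt_iff, h, h1, h2]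

lemma pvBeforeEq_eq_lex {K1 K2 : Type} [LinearOrder K1] [LinearOrder K2]
    [BEq K1] [LawfulBEq K1] (c1 c2 : K1) (a b : K2) :
    (decide (c1 < c2) || (c1 == c2) && decide (a < b))
      = decide (toLex (c1, a) < toLex (c2, b)) := by
  rcases lt_trichotomy c1 c2 with h | h | h
  · simp [h, Prod.Lex.lt_iff]
  · subst h; simp [Prod.Lex.lt_iff]
  · have h1 : ¬ c1 < c2 := not_lt_of_gt h
    have h2 : c1 ≠ c2 := ne_of_gt h
    simp [Prod.Lex.lt_iff, h1, h2]

lemma pvBeforeA_eq_lex (x y : String × List String) (hne : x.1 ≠ y.1) :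
    pvBeforeA x y = decide (pvKeyLex x.1 < pvKeyLex y.1) := by
  unfold pvBeforeA pvKeyLex
  have hbe : (x.1 == y.1) = false := by simp [hne]
  rw [hbe]
  simp only [Bool.false_and, Bool.or_false]
  exact pvBeforeEq_eq_lex _ _ _ _

lemma pvBeforeA_self (x : String × List String) : pvBeforeA x x = false := by
  simp [pvBeforeA]

-- ---- grouping folds ----

lemma pvKeys_modifyfold {κ : Type} [BEq κ] [LawfulBEq κ] (key : String → κ) (l : List String) :
    (l.foldl (fun d f => d.modify (key f) [] (fun v => v ++ [f])) PySem.Dict.empty).keys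
      = PySem.Set.ofList (l.map key) := by
  rw [PySem.Dict.keys_foldl_modify_key l key [] (fun _ x => fun v => v ++ [x]) PySem.Dict.empty]
  simp [PySem.Dict.empty, PySem.Dict.keys, PySem.Set.update_nil_left]

lemma pvNodupKeys_modifyfold {κ : Type} [BEq κ] [LawfulBEq κ] (key : String → κ) (l : List String) :
    (l.foldl (fun d f => d.modify (key f) [] (fun v => v ++ [f])) PySem.Dict.empty).keys.Nodup := by
  rw [pvKeys_modifyfold]
  exact PySem.Set.nodup_ofList _

lemma pvGetD_modifyfold {κ : Type} [BEq κ] [LawfulBEq κ] (key : String → κ) (l : List String) (c : κ) :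
    (l.foldl (fun d f => d.modify (key f) [] (fun v => v ++ [f])) PySem.Dict.empty).getD c []
      = l.filter (fun f => key f == c) := by
  have h : l.foldl (fun d f => d.modify (key f) [] (fun v => v ++ [f])) PySem.Dict.empty
      = (l.map (fun f => (key f, f))).foldl
          (fun d p => d.modify p.1 [] (fun v => v ++ [p.2])) PySem.Dict.empty := by
    rw [List.foldl_map]
  rw [h, PySem.Dict.getD_foldl_modify_append]
  simp only [List.filter_map, Function.comp_def]
  simp [PySem.Dict.empty, PySem.Dict.getD, PySem.Dict.get?]
  exact List.map_id' _

lemma pvItems_modifyfold {κ : Type} [BEq κ] [LawfulBEq κ] (key : String → κ) (l : List String) :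
    (l.foldl (fun d f => d.modify (key f) [] (fun v => v ++ [f])) PySem.Dict.empty).items
      = (PySem.Set.ofList (l.map key)).map (fun c => (c, l.filter (fun f => key f == c))) := by
  rw [PySem.Dict.items_eq_map_keys _ (pvNodupKeys_modifyfold key l) []]
  rw [pvKeys_modifyfold]
  exact List.map_congr_left (fun c _ => by rw [pvGetD_modifyfold])

-- the guarded loop of A is the plain modify loop once the traversed names are distinct
lemma pvGuard_eq_modify (gd : Int) :
    ∀ (rest P : List String), (P ++ rest).Nodup →
    rest.foldl
      (fun g file =>
        let group_key := pvGroupKeyA gd file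
        if file ∈ g.getD group_key [] then g.setdefault group_key []
        else g.modify group_key [] (fun v => v ++ [file]))
      (P.foldl (fun g f => g.modify (pvGroupKeyA gd f) [] (fun v => v ++ [f])) PySem.Dict.empty)
    = (P ++ rest).foldl (fun g f => g.modify (pvGroupKeyA gd f) [] (fun v => v ++ [f]))
        PySem.Dict.empty := by
  intro rest
  induction rest with
  | nil => intro P _; simp
  | cons f rest ih =>
      intro P hnd
      have hfP : f ∉ P := by
        intro hf
        have := List.disjoint_of_nodup_append hnd hf (by simp)
        exact this
      have hmem : f ∉ (P.foldl (fun g f => g.modify (pvGroupKeyA gd f) [] (fun v => v ++ [f]))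
          PySem.Dict.empty).getD (pvGroupKeyA gd f) [] := by
        rw [pvGetD_modifyfold]
        intro hf
        exact hfP (List.mem_of_mem_filter hf)
      simp only [List.foldl_cons]
      rw [if_neg hmem]
      have hstep : (P.foldl (fun g f => g.modify (pvGroupKeyA gd f) [] (fun v => v ++ [f]))
            PySem.Dict.empty).modify (pvGroupKeyA gd f) [] (fun v => v ++ [f])
          = (P ++ [f]).foldl (fun g f => g.modify (pvGroupKeyA gd f) [] (fun v => v ++ [f]))
            PySem.Dict.empty := by
        rw [List.foldl_append]; rfl
      rw [hstep]
      have hnd' : ((P ++ [f]) ++ rest).Nodup := by simpa using hnd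
      have := ih (P ++ [f]) hnd'
      simpa using this
  -- (the `let group_key` in the statement is beta/zeta-reduced by `simp only [List.foldl_cons]`)

-- ---- partition permutation ----

lemma pvFlatten_perm_congr {α κ : Type} (ks : List κ) (g g' : κ → List α)
    (h : ∀ c ∈ ks, (g c).Perm (g' c)) :
    (ks.map g).flatten.Perm (ks.map g').flatten := by
  induction ks with
  | nil => simp
  | cons c ks ih =>
      simp only [List.map_cons, List.flatten_cons]
      exact (h c (by simp)).append (ih (fun c hc => h c (by simp [hc])))

lemma pvPartition_perm {α κ : Type} [DecidableEq α] [DecidableEq κ] [BEq κ] [LawfulBEq κ]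
    (h : α → κ) : ∀ (ks : List κ) (l : List α), ks.Nodup → (∀ x ∈ l, h x ∈ ks) →
    (ks.map (fun c => l.filter (fun x => h x == c))).flatten.Perm l := by
  intro ks
  induction ks with
  | nil =>
      intro l _ hcov
      have : l = [] := List.eq_nil_iff_forall_not_mem.mpr (fun a ha => by simpa using hcov a ha)
      simp [this]
  | cons c ks ih =>
      intro l hnd hcov
      simp only [List.map_cons, List.flatten_cons]
      have hc_not : c ∉ ks := (List.nodup_cons.mp hnd).1
      have hrw : ∀ c' ∈ ks, l.filter (fun x => h x == c')
          = (l.filter (fun x => !(h x == c))).filter (fun x => h x == c') := by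
        intro c' hc'
        rw [List.filter_filter]
        refine (List.filter_congr ?_).symm
        intro x _
        by_cases hx : h x = c'
        · have hne : h x ≠ c := fun e => hc_not (by rw [← hx, e] at hc'; exact hc')
          have hcc : ¬ c' = c := fun e => hne (by rw [hx, e])
          simp [hx, hcc]
        · simp [hx]
      have hmapeq : ks.map (fun c' => l.filter (fun x => h x == c'))
          = ks.map (fun c' => (l.filter (fun x => !(h x == c))).filter (fun x => h x == c')) :=
        List.map_congr_left (fun c' hc' => hrw c' hc')
      rw [hmapeq]
      have hcov' : ∀ x ∈ l.filter (fun x => !(h x == c)), h x ∈ ks := by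
        intro x hx
        rcases List.mem_filter.mp hx with ⟨hxl, hxc⟩
        rcases List.mem_cons.mp (hcov x hxl) with heq | hmem
        · rw [heq] at hxc; simp at hxc
        · exact hmem
      have ihperm := ih (l.filter (fun x => !(h x == c))) (List.nodup_cons.mp hnd).2 hcov'
      exact (List.Perm.append_left _ ihperm).trans (List.filter_append_perm _ l)


-- strictly increasing key list produced by sorting a Nodup list of strings by pvKeyLex
lemma pvKS_pairwise_strict (X : List String) (hnd : X.Nodup) :
    (PySem.List.sorted X pvKeyLex false).Pairwise (fun a b => pvKeyLex a < pvKeyLex b) := by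
  have hperm := PySem.List.sorted_perm X pvKeyLex false
  have hle : (PySem.List.sorted X pvKeyLex false).Pairwise
      (fun a b => pvKeyLex a ≤ pvKeyLex b) := PySem.List.sorted_pairwise X pvKeyLex
  have hndS : (PySem.List.sorted X pvKeyLex false).Nodup := hperm.nodup_iff.mpr hnd
  have := List.Pairwise.and hle hndS
  exact this.imp (fun {a b} h => lt_of_le_of_ne h.1 (fun e => h.2 (pvKeyLex_inj e)))

-- B's sorted(…, key=lambda k: (k.count('.'), k)) equals sorting by the single Lex key
lemma pvSorted2_eq_sortedLex (X : List String) (hnd : X.Nodup) :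
    PySem.List.sorted2 X (fun k => (PySem.Str.count k "." : Int)) (fun k => k) false
      = PySem.List.sorted X pvKeyLex false := by
  show X.foldl (fun acc x => PySem.List.insertBy
      (fun a b => decide ((PySem.Str.count a "." : Int) < (PySem.Str.count b "." : Int)) ||
        !decide ((PySem.Str.count b "." : Int) < (PySem.Str.count a "." : Int)) && decide (a < b))
      x acc) [] = PySem.List.sorted X pvKeyLex false
  refine pvIsort_eq pvKeyLex _ X _ (PySem.List.sorted_perm X pvKeyLex false).symm ?_
    (pvKS_pairwise_strict X hnd)
  intro a b _ _
  exact pvBefore2_eq_lex _ _ _ _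

-- sorting any rearrangement of a filtered slice of sorted(set(fl)) reproduces the slice
lemma pvSortedFilter (fl : List String) (p : String → Bool) (X : List String)
    (hX : X.Perm (PySem.List.sorted (PySem.Set.ofList fl) (fun x => x) false)) :
    PySem.List.sorted (X.filter p) (fun x => x) false
      = (PySem.List.sorted (PySem.Set.ofList fl) (fun x => x) false).filter p := by
  refine PySem.List.sorted_eq_of_perm_of_pairwise_lt _ _ _ ((hX.filter p).symm) ?_
  exact List.Pairwise.filter p (PySem.List.sorted_ofList_pairwise_lt fl)

lemma pvGuard_eq_modify0 (gd : Int) (L : List String) (h : L.Nodup) :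
    L.foldl
      (fun g file =>
        let group_key := pvGroupKeyA gd file
        if file ∈ g.getD group_key [] then g.setdefault group_key []
        else g.modify group_key [] (fun v => v ++ [file]))
      PySem.Dict.empty
    = L.foldl (fun g f => g.modify (pvGroupKeyA gd f) [] (fun v => v ++ [f]))
        PySem.Dict.empty := by
  have := pvGuard_eq_modify gd L [] (by simpa using h)
  simpa using this

-- ---- the canonical result both ports reach ----

def pvCanon (file_list : List String) (group_depth : Int) : List (String × List String) :=
  let su := PySem.List.sorted (PySem.Set.ofList file_list) (fun x => x) false
  (PySem.List.sorted (PySem.Set.ofList (su.map (pvGroupKeyA group_depth))) pvKeyLex false).map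
    (fun k => (k, su.filter (fun f => pvGroupKeyA group_depth f == k)))

lemma pvB_eq_canon (file_list : List String) (group_depth : Int) :
    sort_and_group_by_depth_alt file_list group_depth = pvCanon file_list group_depth := by
  unfold sort_and_group_by_depth_alt pvCanon
  show (PySem.List.sorted2 ((PySem.List.sorted (PySem.Set.ofList file_list) (fun x => x) false).foldl
        (fun g name => g.modify (pvGroupKeyB group_depth name) [] (fun v => v ++ [name]))
        PySem.Dict.empty).keys (fun k => (PySem.Str.count k "." : Int)) (fun k => k) false).map
      (fun k => (k, ((PySem.List.sorted (PySem.Set.ofList file_list) (fun x => x) false).foldl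
        (fun g name => g.modify (pvGroupKeyB group_depth name) [] (fun v => v ++ [name]))
        PySem.Dict.empty).getD k []))
    = (PySem.List.sorted (PySem.Set.ofList
        ((PySem.List.sorted (PySem.Set.ofList file_list) (fun x => x) false).map
          (pvGroupKeyA group_depth))) pvKeyLex false).map
      (fun k => (k, (PySem.List.sorted (PySem.Set.ofList file_list) (fun x => x) false).filter
        (fun f => pvGroupKeyA group_depth f == k)))
  rw [pvGroupKeyB_eq]
  rw [pvKeys_modifyfold (pvGroupKeyA group_depth)
    (PySem.List.sorted (PySem.Set.ofList file_list) (fun x => x) false)]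
  rw [pvSorted2_eq_sortedLex _ (PySem.Set.nodup_ofList _)]
  refine List.map_congr_left ?_
  intro k _
  rw [pvGetD_modifyfold (pvGroupKeyA group_depth)
    (PySem.List.sorted (PySem.Set.ofList file_list) (fun x => x) false) k]

lemma pvA_eq_canon (file_list : List String) (group_depth : Int) :
    sort_and_group_by_depth file_list group_depth = pvCanon file_list group_depth := by
  have hU : (PySem.Set.ofList file_list).Nodup := PySem.Set.nodup_ofList file_list
  have hsu : (PySem.List.sorted (PySem.Set.ofList file_list) (fun x => x) false).Perm
      (PySem.Set.ofList file_list) := PySem.List.sorted_perm _ _ _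
  unfold sort_and_group_by_depth
  show ((((PySem.Dict.mk (((PySem.Set.ofList file_list).foldl
        (fun d filename => d.modify ((PySem.Str.count filename "." : Int)) []
          (fun v => v ++ [filename])) PySem.Dict.empty).items.map
          (fun p => (p.1, PySem.List.sorted p.2 pvSplitDots false)))).values.foldl
      (fun g files => files.foldl (fun g file =>
            let group_key := pvGroupKeyA group_depth file
            if file ∈ g.getD group_key [] then g.setdefault group_key []
            else g.modify group_key [] (fun v => v ++ [file])) g)
      PySem.Dict.empty).items.foldl (fun acc x => PySem.List.insertBy pvBeforeA x acc) []).map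
        (fun p => (p.1, PySem.List.sorted p.2 (fun x => x) false)))
    = pvCanon file_list group_depth
  -- step 1: the depth dictionary in closed form
  rw [pvItems_modifyfold (fun f => (PySem.Str.count f "." : Int)) (PySem.Set.ofList file_list)]
  -- step 2: its values after the in-place sorts
  have hvals : (PySem.Dict.mk (((PySem.Set.ofList
        (List.map (fun f => (PySem.Str.count f "." : Int)) (PySem.Set.ofList file_list))).map
          (fun c => (c, (PySem.Set.ofList file_list).filter
            (fun f => (PySem.Str.count f "." : Int) == c)))).map
        (fun p => (p.1, PySem.List.sorted p.2 pvSplitDots false)))).values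
      = (PySem.Set.ofList
          (List.map (fun f => (PySem.Str.count f "." : Int)) (PySem.Set.ofList file_list))).map
          (fun c => PySem.List.sorted ((PySem.Set.ofList file_list).filter
            (fun f => (PySem.Str.count f "." : Int) == c)) pvSplitDots false) := by
    simp [PySem.Dict.values, List.map_map, Function.comp_def]
  rw [hvals]
  rw [← List.foldl_flatten]
  -- the flattened traversal order and its properties
  set L := ((PySem.Set.ofList
      (List.map (fun f => (PySem.Str.count f "." : Int)) (PySem.Set.ofList file_list))).map
      (fun c => PySem.List.sorted ((PySem.Set.ofList file_list).filter
        (fun f => (PySem.Str.count f "." : Int) == c)) pvSplitDots false)).flatten with hLdef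
  have hLU : L.Perm (PySem.Set.ofList file_list) := by
    rw [hLdef]
    refine (pvFlatten_perm_congr _ _ _ ?_).trans
      (pvPartition_perm (fun f => (PySem.Str.count f "." : Int)) _ (PySem.Set.ofList file_list)
        (PySem.Set.nodup_ofList _) ?_)
    · intro c _
      exact PySem.List.sorted_perm _ _ _
    · intro x hx
      exact (PySem.Set.mem_ofList _ _).mpr (List.mem_map_of_mem hx)
  have hLnd : L.Nodup := hLU.nodup_iff.mpr hU
  have hLsu : L.Perm (PySem.List.sorted (PySem.Set.ofList file_list) (fun x => x) false) :=
    hLU.trans hsu.symm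
  -- step 3: the guarded grouping loop is the plain modify loop
  rw [pvGuard_eq_modify0 group_depth L hLnd]
  -- step 4: the grouped dict in closed form
  rw [pvItems_modifyfold (pvGroupKeyA group_depth) L]
  -- step 5: the final sort
  have hkeysperm : (PySem.Set.ofList (L.map (pvGroupKeyA group_depth))).Perm
      (PySem.List.sorted (PySem.Set.ofList
        ((PySem.List.sorted (PySem.Set.ofList file_list) (fun x => x) false).map
          (pvGroupKeyA group_depth))) pvKeyLex false) := by
    refine ((List.perm_ext_iff_of_nodup (PySem.Set.nodup_ofList _)
      (PySem.Set.nodup_ofList _)).mpr ?_).trans (PySem.List.sorted_perm _ _ _).symm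
    intro k
    simp only [PySem.Set.mem_ofList, List.mem_map]
    constructor
    · rintro ⟨f, hf, rfl⟩; exact ⟨f, hLsu.mem_iff.mp hf, rfl⟩
    · rintro ⟨f, hf, rfl⟩; exact ⟨f, hLsu.mem_iff.mpr hf, rfl⟩
  have hsort := pvKS_pairwise_strict (PySem.Set.ofList
    ((PySem.List.sorted (PySem.Set.ofList file_list) (fun x => x) false).map
      (pvGroupKeyA group_depth))) (PySem.Set.nodup_ofList _)
  rw [pvIsort_eq (fun p => pvKeyLex p.1) pvBeforeA _
    ((PySem.List.sorted (PySem.Set.ofList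
        ((PySem.List.sorted (PySem.Set.ofList file_list) (fun x => x) false).map
          (pvGroupKeyA group_depth))) pvKeyLex false).map
      (fun k => (k, L.filter (fun f => pvGroupKeyA group_depth f == k))))
    (hkeysperm.map _)
    ?_
    (List.pairwise_map.mpr hsort)]
  · -- step 6: sort each group's members
    unfold pvCanon
    show _ = (PySem.List.sorted (PySem.Set.ofList
        ((PySem.List.sorted (PySem.Set.ofList file_list) (fun x => x) false).map
          (pvGroupKeyA group_depth))) pvKeyLex false).map
      (fun k => (k, (PySem.List.sorted (PySem.Set.ofList file_list) (fun x => x) false).filter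
        (fun f => pvGroupKeyA group_depth f == k)))
    rw [List.map_map]
    refine List.map_congr_left ?_
    intro k _
    simp only [Function.comp_def]
    rw [pvSortedFilter file_list _ L hLsu]
  · -- pvBeforeA agrees with the Lex key on the sorted items
    intro a b ha hb
    rcases List.mem_map.mp ha with ⟨k1, _, rfl⟩
    rcases List.mem_map.mp hb with ⟨k2, _, rfl⟩
    by_cases hk : k1 = k2
    · subst hk
      simp [pvBeforeA_self]
    · exact pvBeforeA_eq_lex _ _ hk

-- ===== VERDICT (by name: the statement is the Claim_ definition above) =====
theorem sort_and_group_by_depth_spec : Claim_equal_sort_and_group_by_depth := by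
  intro file_list group_depth _
  unfold Spec_sort_and_group_by_depth
  rw [pvA_eq_canon, pvB_eq_canon]
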